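-- pv_equiv track=rewrite | github.com/svnstfns/scale-api-compose-pilot | samples/inventor/app/status_display.py | _align_colons
-- ===== SOURCE A (Python) =====
-- from typing import Dict, Any, Optional, List, Tuple
--
-- def _align_colons(lines: List[str]) -> List[str]:
--     """
--     Richtet den Text an Doppelpunkten aus.
--
--     Args:
--         lines: Liste von Textzeilen mit Doppelpunkten
--
--     Returns:
--         Liste mit ausgerichteten Textzeilen
--     """
--     # Finde die längste Beschriftung vor einem Doppelpunkt
--     max_label_length = 0
--     for line in lines:
--         if ':' in line:
--             label_length = line.find(':')
--             max_label_length = max(max_label_length, label_length)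
--
--     # Richte die Doppelpunkte aus
--     aligned_lines = []
--     for line in lines:
--         if ':' in line:
--             label, value = line.split(':', 1)
--             aligned_line = f"{label.ljust(max_label_length)}: {value.lstrip()}"
--             aligned_lines.append(aligned_line)
--         else:
--             aligned_lines.append(line)
--
--     return aligned_lines
-- ===== SOURCE B (Python) =====
-- def _align_colons(lines):
--     """Online single pass: emit each line aligned to the running max label width;
--     when a longer label arrives, retro-pad the already-emitted aligned lines in place."""
--     out = []
--     fix = []  # (index in out, label length) of each aligned line emitted so far
--     width = 0
--     for line in lines:
--         i = line.find(':')
--         if i < 0: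
--             out.append(line)
--             continue
--         head = line[:i]
--         value = line[i + 1:].lstrip()
--         if len(head) > width:
--             pad = ' ' * (len(head) - width)
--             width = len(head)
--             for j, ll in fix:
--                 s = out[j]
--                 out[j] = s[:ll] + pad + s[ll:]
--         out.append(head + ' ' * (width - len(head)) + ': ' + value)
--         fix.append((len(out) - 1, len(head)))
--     return out
-- ===== Notes on version B (the rewrite author's own statement) =====
-- stated objective: alternative
-- what changed: B is an online single forward pass with no precomputed maximum: it emits every line aligned to the running max label width and, whenever a longer label arrives, retro-pads the already-emitted aligned lines in place via a fix-up index; A first scans all lines to find the global max, then renders in a second pass.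
import Mathlib
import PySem

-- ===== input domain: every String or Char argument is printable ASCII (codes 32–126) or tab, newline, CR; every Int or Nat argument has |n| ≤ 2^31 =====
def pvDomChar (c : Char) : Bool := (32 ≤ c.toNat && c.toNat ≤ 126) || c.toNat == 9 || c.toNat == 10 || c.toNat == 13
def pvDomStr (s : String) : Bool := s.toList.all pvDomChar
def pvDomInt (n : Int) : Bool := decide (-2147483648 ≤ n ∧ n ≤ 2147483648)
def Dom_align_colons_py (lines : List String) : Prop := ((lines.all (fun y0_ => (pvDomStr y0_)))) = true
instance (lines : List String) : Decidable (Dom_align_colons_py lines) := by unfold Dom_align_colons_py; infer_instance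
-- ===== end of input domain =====

-- B is an online single pass (no precomputed max): it aligns to the running max label width
-- and retro-pads already-emitted aligned lines in place when a longer label arrives;
-- A precomputes the global max in a first pass and renders in a second.


-- ===== PORT A =====
-- Python's str.ljust(w): pad on the right with spaces to width w (no-op if already long enough)
def pyLjust (s : String) (w : Int) : String :=
  String.ofList (s.toList ++ List.replicate (w - s.toList.length).toNat ' ')

def align_colons_py (lines : List String) : List String :=
  -- first pass: find the longest label before a colon
  let maxLabelLength : Int := lines.foldl (fun m line =>
      if PySem.Str.isIn ":" line then max m (PySem.Str.find line ":") else m) 0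
  -- second pass: align the colons
  lines.foldl (fun acc line =>
    if PySem.Str.isIn ":" line then
      match PySem.Str.splitMax? line ":" 1 with
      | some (label :: value :: _) =>
          acc ++ [pyLjust label maxLabelLength ++ ": " ++ PySem.Str.lstrip value]
      | _ => acc ++ [line]      -- unreachable: ':' in line gives exactly two parts
    else acc ++ [line]) []

-- ===== PORT B =====
-- inner fix-up loop body: out[j] = s[:ll] + pad + s[ll:]
-- (out[j] read/written via getD/set on j.toNat: j is always a valid non-negative index here, exact on that)
def fixstep (pad : String) (o : List String) (jl : Int × Int) : List String :=
  let s := o.getD jl.1.toNat ""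
  o.set jl.1.toNat (PySem.Str.slice s none (some jl.2) ++ pad ++ PySem.Str.slice s (some jl.2) none)

-- one iteration of B's single forward pass over (out, fix, width)
def stepB (st : List String × List (Int × Int) × Int) (line : String) :
    List String × List (Int × Int) × Int :=
  match st with
  | (out, fix, width) =>
    let i := PySem.Str.find line ":"
    if i < 0 then (out ++ [line], fix, width)
    else
      let head := PySem.Str.slice line none (some i)
      let value := PySem.Str.lstrip (PySem.Str.slice line (some (i + 1)) none)
      let hl := PySem.Str.len head
      let ow : List String × Int :=
        if hl > width then
          (fix.foldl (fixstep (String.ofList (List.replicate (hl - width).toNat ' '))) out, hl)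
        else (out, width)
      let out2 := ow.1 ++ [head ++ String.ofList (List.replicate (ow.2 - hl).toNat ' ') ++ ": " ++ value]
      (out2, fix ++ [(((out2.length : Nat) : Int) - 1, hl)], ow.2)

def align_colons_py_alt (lines : List String) : List String :=
  (lines.foldl stepB ([], [], 0)).1

-- ===== PRECONDITION & SPEC =====
def Spec_align_colons_py (lines : List String) (out : List String) : Prop := out = align_colons_py_alt lines
instance (lines : List String) (out : List String) : Decidable (Spec_align_colons_py lines out) := by unfold Spec_align_colons_py; infer_instance

-- ===== CLAIM (what is proved, stated in full; the proofs are below) =====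
def Claim_equal_align_colons_py : Prop := ∀ (lines : List String), Dom_align_colons_py lines → Spec_align_colons_py lines (align_colons_py lines)

-- ===== LEMMAS AND PROOFS =====

-- split a char list at its first colon, if any
def splitFirstColon : List Char → Option (List Char × List Char)
  | [] => none
  | c :: r => if c = ':' then some ([], r)
              else (splitFirstColon r).map (fun p => (c :: p.1, p.2))

theorem splitFirstColon_none_iff (l : List Char) : splitFirstColon l = none ↔ ':' ∉ l := by
  induction l with
  | nil => simp [splitFirstColon]
  | cons c r ih =>
    by_cases h : c = ':' <;> simp [splitFirstColon, h, ih, eq_comm]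

theorem splitFirstColon_some (l a b : List Char) (h : splitFirstColon l = some (a, b)) :
    l = a ++ ':' :: b ∧ ':' ∉ a := by
  induction l generalizing a b with
  | nil => simp [splitFirstColon] at h
  | cons c r ih =>
    by_cases hc : c = ':'
    · rw [splitFirstColon, if_pos hc] at h
      simp only [Option.some.injEq, Prod.mk.injEq] at h
      obtain ⟨h1, h2⟩ := h
      subst hc
      constructor
      · rw [← h1, ← h2]; simp
      · rw [← h1]; simp
    · rw [splitFirstColon, if_neg hc] at h
      cases hr : splitFirstColon r with
      | none => rw [hr] at h; simp at h
      | some p =>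
        obtain ⟨a', b'⟩ := p
        rw [hr] at h
        simp only [Option.map_some, Option.some.injEq, Prod.mk.injEq] at h
        obtain ⟨ha, hb⟩ := h
        obtain ⟨h1, h2⟩ := ih a' b' hr
        subst hb
        constructor
        · rw [← ha, h1]; simp
        · rw [← ha]
          intro hmem
          rcases List.mem_cons.mp hmem with hx | hx
          · exact hc hx.symm
          · exact h2 hx

theorem singleton_prefix_iff (c : Char) (l : List Char) :
    [c] <+: l ↔ l.head? = some c := by
  cases l with
  | nil => simp
  | cons x r => simp [List.cons_prefix_cons, eq_comm]

theorem singleton_infix_iff (c : Char) (l : List Char) : [c] <:+: l ↔ c ∈ l := by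
  constructor
  · intro h; exact h.mem (by simp)
  · intro h
    obtain ⟨s, t, rfl⟩ := List.append_of_mem h
    exact ⟨s, t, by simp⟩

-- Chars.find for a colon, characterised by splitFirstColon
theorem find_colon (l : List Char) :
    PySem.Chars.find l [':'] =
      (match splitFirstColon l with
       | none => -1
       | some (a, _) => (a.length : Int)) := by
  cases hs : splitFirstColon l with
  | none =>
    simp only []
    rw [PySem.Chars.find_eq_neg_one_iff, singleton_infix_iff]
    exact (splitFirstColon_none_iff l).mp hs
  | some p =>
    obtain ⟨a, b⟩ := p
    obtain ⟨hl, hna⟩ := splitFirstColon_some l a b hs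
    have hinf : [':'] <:+: l := (singleton_infix_iff _ _).mpr (by simp [hl])
    have hnn : 0 ≤ PySem.Chars.find l [':'] := (PySem.Chars.find_nonneg_iff _ _).mpr hinf
    obtain ⟨hpre, hmin⟩ := PySem.Chars.find_spec hnn
    set i := (PySem.Chars.find l [':']).toNat with hi
    have hpa : [':'] <+: l.drop a.length := by
      rw [singleton_prefix_iff, hl]
      simp [List.drop_append]
    have hge : a.length ≤ i := by
      by_contra hlt
      push_neg at hlt
      rw [singleton_prefix_iff, hl, List.drop_append_of_le_length (le_of_lt hlt)] at hpre
      cases hda : a.drop i with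
      | nil => rw [List.drop_eq_nil_iff] at hda; omega
      | cons x xs =>
        rw [hda] at hpre
        simp only [List.cons_append, List.head?_cons, Option.some.injEq] at hpre
        apply hna
        have hx : x ∈ a.drop i := by rw [hda]; simp
        rw [hpre] at hx
        exact List.mem_of_mem_drop hx
    have hle : i ≤ a.length := by
      by_contra hgt
      push_neg at hgt
      exact hmin a.length hgt hpa
    have : i = a.length := le_antisymm hle hge
    simp only []
    omega

theorem find_str (line : String) :
    PySem.Str.find line ":" =
      (match splitFirstColon line.toList with
       | none => -1
       | some (a, _) => (a.length : Int)) := by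
  rw [PySem.Str.find_eq, show (":".toList) = [':'] from by decide]
  exact find_colon line.toList

-- splitOnMax.go with m = 0 returns immediately
theorem goZero (sep : List Char) (fuel : Nat) (l cur : List Char) (acc : List (List Char)) :
    PySem.Chars.splitOnMax.go sep fuel 0 l cur acc = ((cur.reverse ++ l) :: acc).reverse := by
  cases fuel with
  | zero => simp [PySem.Chars.splitOnMax.go]
  | succ f =>
    cases l with
    | nil => simp [PySem.Chars.splitOnMax.go]
    | cons c r => simp [PySem.Chars.splitOnMax.go]

-- splitOnMax.go with m = 1 splits at the first colon
theorem goOne (fuel : Nat) (l cur : List Char) (acc : List (List Char))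
    (hf : l.length < fuel) :
    PySem.Chars.splitOnMax.go [':'] fuel 1 l cur acc =
      (match splitFirstColon l with
       | none => ((cur.reverse ++ l) :: acc).reverse
       | some (a, b) => (b :: (cur.reverse ++ a) :: acc).reverse) := by
  induction l generalizing fuel cur acc with
  | nil =>
    cases fuel with
    | zero => omega
    | succ f => simp [PySem.Chars.splitOnMax.go, splitFirstColon]
  | cons c r ih =>
    cases fuel with
    | zero => omega
    | succ f =>
      by_cases hc : c = ':'
      · subst hc
        rw [PySem.Chars.splitOnMax.go]
        simp [List.isPrefixOf, goZero, splitFirstColon]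
      · rw [PySem.Chars.splitOnMax.go]
        have hpf : [':'].isPrefixOf (c :: r) = false := by
          simp [List.isPrefixOf, Ne.symm hc]
        simp only [hpf, if_neg (by omega : ¬ (1 : Nat) = 0), Bool.false_eq_true, if_false]
        rw [ih f (c :: cur) acc (by simpa using Nat.lt_of_succ_lt_succ hf)]
        cases hs : splitFirstColon r with
        | none => simp [splitFirstColon, hc, hs]
        | some p => obtain ⟨a, b⟩ := p; simp [splitFirstColon, hc, hs]

theorem splitMax_colon (l : List Char) :
    PySem.Chars.splitMax? l [':'] 1 =
      some (match splitFirstColon l with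
            | none => [l]
            | some (a, b) => [a, b]) := by
  rw [PySem.Chars.splitMax?]
  simp only [List.isEmpty_cons, Option.some.injEq]
  rw [PySem.Chars.splitOnMax, if_neg (by norm_num)]
  norm_num
  rw [goOne (l.length + 1) l [] [] (by omega)]
  cases hs : splitFirstColon l with
  | none => simp
  | some p => obtain ⟨a, b⟩ := p; simp

-- isIn for a colon
theorem isIn_colon (l : List Char) :
    PySem.Chars.isIn [':'] l = ((splitFirstColon l).isSome) := by
  cases hs : splitFirstColon l with
  | none =>
    simp [PySem.Chars.isIn_eq_false_iff, singleton_infix_iff,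
      (splitFirstColon_none_iff l).mp hs]
  | some p =>
    obtain ⟨a, b⟩ := p
    obtain ⟨hl, -⟩ := splitFirstColon_some l a b hs
    simp [PySem.Chars.isIn_iff_infix, singleton_infix_iff, hl]

-- the aligned rendering of one line at width w (the common semantic object)
def renderL (w : Int) (line : String) : String :=
  match splitFirstColon line.toList with
  | none => line
  | some (a, b) =>
      String.ofList a ++ String.ofList (List.replicate (w - (a.length : Int)).toNat ' ')
        ++ ": " ++ String.ofList (PySem.Chars.lstrip b)

-- per-line width update (shared characterisation of the running max)
def wUpd (m : Int) (line : String) : Int :=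
  match splitFirstColon line.toList with
  | none => m
  | some (a, _) => max m (a.length : Int)

-- B's fix-up table for a processed prefix, with index offset k
def fixOf (p : List String) (k : Nat) : List (Int × Int) :=
  match p with
  | [] => []
  | l :: r =>
    match splitFirstColon l.toList with
    | none => fixOf r (k + 1)
    | some (a, _) => ((k : Int), (a.length : Int)) :: fixOf r (k + 1)

-- A's width-update function agrees with wUpd
theorem widthA (m : Int) (line : String) :
    (if PySem.Str.isIn ":" line then max m (PySem.Str.find line ":") else m) = wUpd m line := by
  have hi : PySem.Str.isIn ":" line = ((splitFirstColon line.toList).isSome) := by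
    rw [PySem.Str.isIn_eq, show (":".toList) = [':'] from by decide]
    exact isIn_colon line.toList
  rw [hi, find_str, wUpd]
  cases hs : splitFirstColon line.toList with
  | none => simp
  | some p => obtain ⟨a, b⟩ := p; simp

-- the initial accumulator is a lower bound of a wUpd fold
theorem foldl_wUpd_ge (p : List String) (m : Int) : m ≤ p.foldl wUpd m := by
  induction p generalizing m with
  | nil => simp
  | cons l r ih =>
    refine le_trans ?_ (ih (wUpd m l))
    unfold wUpd
    cases splitFirstColon l.toList with
    | none => exact le_refl m
    | some q => exact le_max_left _ _

-- every label length recorded in the fix-up table is bounded by the folded width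
theorem fixOf_le (p : List String) (k : Nat) (m : Int) :
    ∀ jl ∈ fixOf p k, jl.2 ≤ p.foldl wUpd m := by
  induction p generalizing k m with
  | nil => simp [fixOf]
  | cons l r ih =>
    intro jl hjl
    rw [fixOf] at hjl
    cases hs : splitFirstColon l.toList with
    | none =>
      rw [hs] at hjl
      simpa using ih (k + 1) (wUpd m l) jl hjl
    | some q =>
      obtain ⟨a, b⟩ := q
      rw [hs] at hjl
      rcases List.mem_cons.mp hjl with h | h
      · subst h
        refine le_trans ?_ (foldl_wUpd_ge r (wUpd m l))
        unfold wUpd; rw [hs]; exact le_max_right _ _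
      · simpa using ih (k + 1) (wUpd m l) jl h

-- fix-up table of a one-element extension
theorem fixOf_append_one (p : List String) (l : String) (k : Nat) :
    fixOf (p ++ [l]) k =
      fixOf p k ++
        (match splitFirstColon l.toList with
         | none => []
         | some (a, _) => [(((k + p.length : Nat) : Int), (a.length : Int))]) := by
  induction p generalizing k with
  | nil =>
    cases hs : splitFirstColon l.toList with
    | none => simp [fixOf, hs]
    | some q => obtain ⟨a, b⟩ := q; simp [fixOf, hs]
  | cons x r ih =>
    rw [List.cons_append, fixOf, fixOf]
    cases hx : splitFirstColon x.toList with
    | none =>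
      rw [ih (k + 1)]
      cases hs : splitFirstColon l.toList with
      | none => simp
      | some q =>
        obtain ⟨a, b⟩ := q
        simp only [List.length_cons]
        have : k + 1 + r.length = k + (r.length + 1) := by omega
        rw [this]
    | some q =>
      obtain ⟨a, b⟩ := q
      rw [ih (k + 1)]
      cases hs : splitFirstColon l.toList with
      | none => simp
      | some q' =>
        obtain ⟨a', b'⟩ := q'
        simp only [List.length_cons, List.cons_append, List.cons.injEq, true_and]
        have : k + 1 + r.length = k + (r.length + 1) := by omega
        rw [this]

-- getD / set on an append boundary
theorem getD_append_cons {α : Type} [Inhabited α] (pre : List α) (x d : α) (t : List α) :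
    (pre ++ x :: t).getD pre.length d = x := by
  induction pre with
  | nil => rfl
  | cons y r ih => simpa using ih

theorem set_append_cons {α : Type} (pre : List α) (x y : α) (t : List α) :
    (pre ++ x :: t).set pre.length y = pre ++ y :: t := by
  induction pre with
  | nil => rfl
  | cons z r ih => simp [List.set, ih]

-- one fix-up step re-pads one rendered line from width w to width w'
theorem fixstep_render (w w' : Int) (line : String) (a b : List Char)
    (hs : splitFirstColon line.toList = some (a, b))
    (hll : (a.length : Int) ≤ w) (hw : w ≤ w') :
    PySem.Str.slice (renderL w line) none (some (a.length : Int))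
      ++ String.ofList (List.replicate (w' - w).toNat ' ')
      ++ PySem.Str.slice (renderL w line) (some (a.length : Int)) none
    = renderL w' line := by
  have hrl : (renderL w line).toList
      = a ++ (List.replicate (w - (a.length : Int)).toNat ' ' ++ (':' :: ' ' :: PySem.Chars.lstrip b)) := by
    unfold renderL; rw [hs]
    simp
  apply String.ext
  simp only [String.toList_append, PySem.Str.toList_slice, PySem.Chars.slice_eq_listSlice]
  rw [PySem.List.slice_to _ (by positivity), PySem.List.slice_from _ (by positivity), hrl]
  simp only [Int.toNat_natCast, List.take_left', List.drop_left']
  unfold renderL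
  rw [hs]
  simp only [String.toList_append, String.toList_ofList]
  have hrep : List.replicate (w' - w).toNat ' ' ++ List.replicate (w - (a.length : Int)).toNat ' '
      = List.replicate (w' - (a.length : Int)).toNat ' ' := by
    rw [← List.replicate_add]
    congr 1
    omega
  rw [List.append_assoc a, ← List.append_assoc (List.replicate (w' - w).toNat ' '), hrep,
    show (": ".toList) = [':', ' '] from by decide]
  simp

-- applying the whole fix-up table re-pads every rendered line from width w to width w'
theorem repadFold (p : List String) (pre : List String) (w w' : Int) (hw : w ≤ w')
    (hle : ∀ jl ∈ fixOf p pre.length, jl.2 ≤ w) :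
    (fixOf p pre.length).foldl (fixstep (String.ofList (List.replicate (w' - w).toNat ' ')))
        (pre ++ p.map (renderL w))
      = pre ++ p.map (renderL w') := by
  induction p generalizing pre with
  | nil => simp [fixOf]
  | cons l r ih =>
    rw [fixOf]
    cases hs : splitFirstColon l.toList with
    | none =>
      have hrnone : renderL w l = l := by unfold renderL; rw [hs]
      have h2 : renderL w' l = l := by unfold renderL; rw [hs]
      rw [fixOf] at hle
      rw [hs] at hle
      have := ih (pre ++ [l])
        (by simpa using hle)
      simp only [List.length_append, List.length_cons, List.length_nil] at this
      simp only [List.map_cons, hrnone, h2]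
      calc (fixOf r (pre.length + 1)).foldl
              (fixstep (String.ofList (List.replicate (w' - w).toNat ' ')))
              (pre ++ l :: r.map (renderL w))
          = (fixOf r (pre.length + 1)).foldl
              (fixstep (String.ofList (List.replicate (w' - w).toNat ' ')))
              ((pre ++ [l]) ++ r.map (renderL w)) := by simp
        _ = (pre ++ [l]) ++ r.map (renderL w') := this
        _ = pre ++ l :: r.map (renderL w') := by simp
    | some q =>
      obtain ⟨a, b⟩ := q
      rw [fixOf] at hle
      rw [hs] at hle
      have hha : (a.length : Int) ≤ w := by
        have := hle ((pre.length : Int), (a.length : Int)) (by simp)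
        simpa using this
      simp only [List.map_cons, List.foldl_cons]
      have hstep : fixstep (String.ofList (List.replicate (w' - w).toNat ' '))
          (pre ++ renderL w l :: r.map (renderL w)) ((pre.length : Int), (a.length : Int))
          = pre ++ renderL w' l :: r.map (renderL w) := by
        unfold fixstep
        simp only [Int.toNat_natCast]
        rw [getD_append_cons, set_append_cons]
        rw [show PySem.Str.slice (renderL w l) none (some (a.length : Int))
              ++ String.ofList (List.replicate (w' - w).toNat ' ')
              ++ PySem.Str.slice (renderL w l) (some (a.length : Int)) none
            = renderL w' l from fixstep_render w w' l a b hs hha hw]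
      rw [hstep]
      have := ih (pre ++ [renderL w' l]) (by simpa using fun jl h => hle jl (List.mem_cons_of_mem _ h))
      simp only [List.length_append, List.length_cons, List.length_nil] at this
      calc (fixOf r (pre.length + 1)).foldl
              (fixstep (String.ofList (List.replicate (w' - w).toNat ' ')))
              (pre ++ renderL w' l :: r.map (renderL w))
          = (fixOf r (pre.length + 1)).foldl
              (fixstep (String.ofList (List.replicate (w' - w).toNat ' ')))
              ((pre ++ [renderL w' l]) ++ r.map (renderL w)) := by simp
        _ = (pre ++ [renderL w' l]) ++ r.map (renderL w') := this
        _ = pre ++ renderL w' l :: r.map (renderL w') := by simp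

-- head/value slices of a line with a colon
theorem slice_head (line : String) (a b : List Char)
    (hl : line.toList = a ++ ':' :: b) :
    PySem.Str.slice line none (some (a.length : Int)) = String.ofList a := by
  apply String.ext
  rw [PySem.Str.toList_slice, PySem.Chars.slice_eq_listSlice,
    PySem.List.slice_to _ (by positivity)]
  simp [hl]

theorem slice_value (line : String) (a b : List Char)
    (hl : line.toList = a ++ ':' :: b) :
    PySem.Str.slice line (some ((a.length : Int) + 1)) none = String.ofList b := by
  apply String.ext
  rw [PySem.Str.toList_slice, PySem.Chars.slice_eq_listSlice,
    PySem.List.slice_from _ (by positivity)]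
  have h1 : ((a.length : Int) + 1).toNat = a.length + 1 := by omega
  rw [h1, hl, show a ++ ':' :: b = (a ++ [':']) ++ b from by simp,
    show a.length + 1 = (a ++ [':']).length from by simp, List.drop_left]
  simp

-- one stepB step preserves the loop invariant
theorem stepInv (p : List String) (line : String) :
    stepB (p.map (renderL (p.foldl wUpd 0)), fixOf p 0, p.foldl wUpd 0) line
      = ((p ++ [line]).map (renderL ((p ++ [line]).foldl wUpd 0)),
         fixOf (p ++ [line]) 0,
         (p ++ [line]).foldl wUpd 0) := by
  have hWapp : (p ++ [line]).foldl wUpd 0 = wUpd (p.foldl wUpd 0) line := by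
    rw [List.foldl_append]; rfl
  set W := p.foldl wUpd 0 with hW
  have hW0 : 0 ≤ W := foldl_wUpd_ge p 0
  rw [stepB]
  simp only [find_str]
  cases hs : splitFirstColon line.toList with
  | none =>
    rw [if_pos (by norm_num : (-1 : Int) < 0)]
    have hr : renderL W line = line := by unfold renderL; rw [hs]
    have hwu : wUpd W line = W := by unfold wUpd; rw [hs]
    rw [fixOf_append_one, hs, hWapp, hwu]
    simp [hr]
  | some q =>
    obtain ⟨a, b⟩ := q
    obtain ⟨hl, -⟩ := splitFirstColon_some _ a b hs
    rw [if_neg (by omega : ¬ ((a.length : Int) < 0))]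
    have hhead := slice_head line a b hl
    have hvalue := slice_value line a b hl
    have hlstrip : PySem.Str.lstrip (String.ofList b) = String.ofList (PySem.Chars.lstrip b) := by
      apply String.ext; rw [PySem.Str.toList_lstrip]; simp
    have hlen : PySem.Str.len (String.ofList a) = (a.length : Int) := by
      rw [PySem.Str.len_eq]; simp
    have hwu : wUpd W line = max W (a.length : Int) := by unfold wUpd; rw [hs]
    simp only [hhead, hvalue, hlstrip, hlen]
    have hrender : ∀ w' : Int,
        String.ofList a ++ String.ofList (List.replicate (w' - (a.length : Int)).toNat ' ')
          ++ ": " ++ String.ofList (PySem.Chars.lstrip b) = renderL w' line := by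
      intro w'; unfold renderL; rw [hs]
    by_cases hgt : (a.length : Int) > W
    · rw [if_pos hgt]
      simp only []
      have hrf : (fixOf p 0).foldl
          (fixstep (String.ofList (List.replicate ((a.length : Int) - W).toNat ' ')))
          (p.map (renderL W)) = p.map (renderL (a.length : Int)) := by
        have := repadFold p [] W (a.length : Int) (le_of_lt hgt)
          (by simpa using fixOf_le p 0 0)
        simpa using this
      rw [hrf]
      rw [fixOf_append_one, hs, hWapp, hwu, max_eq_right (le_of_lt hgt)]
      simp only [List.nil_append, List.map_append, List.map_cons, List.map_nil,
        List.length_append, List.length_map, List.length_cons, List.length_nil]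
      rw [hrender (a.length : Int)]
      have hc : ((p.length + (0 + 1) : Nat) : Int) - 1 = ((0 + p.length : Nat) : Int) := by
        push_cast; omega
      rw [hc]
    · rw [if_neg hgt]
      simp only []
      rw [fixOf_append_one, hs, hWapp, hwu, max_eq_left (by omega)]
      simp only [List.map_append, List.map_cons, List.map_nil,
        List.length_append, List.length_map, List.length_cons, List.length_nil]
      rw [hrender W]
      have hc : ((p.length + (0 + 1) : Nat) : Int) - 1 = ((0 + p.length : Nat) : Int) := by
        push_cast; omega
      rw [hc]

-- the full fold satisfies the invariant
theorem foldInv (ls p : List String) :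
    ls.foldl stepB (p.map (renderL (p.foldl wUpd 0)), fixOf p 0, p.foldl wUpd 0)
      = ((p ++ ls).map (renderL ((p ++ ls).foldl wUpd 0)),
         fixOf (p ++ ls) 0,
         (p ++ ls).foldl wUpd 0) := by
  induction ls generalizing p with
  | nil => simp
  | cons l rest ih =>
    rw [List.foldl_cons, stepInv p l, ih (p ++ [l])]
    simp

-- appending singletons in a fold is map
theorem foldl_append_map' {α β : Type} (f : α → β) (ls : List α) (init : List β) :
    ls.foldl (fun acc x => acc ++ [f x]) init = init ++ ls.map f := by
  induction ls generalizing init with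
  | nil => simp
  | cons x rest ih => simp [ih]

-- A's per-line rendering, as a function
def fA (w : Int) (line : String) : String :=
  if PySem.Str.isIn ":" line then
    match PySem.Str.splitMax? line ":" 1 with
    | some (label :: value :: _) => pyLjust label w ++ ": " ++ PySem.Str.lstrip value
    | _ => line
  else line

-- per line: A's rendering equals renderL, for any width w
theorem renderLine (w : Int) (line : String) :
    fA w line = renderL w line := by
  have hcolon : (":".toList) = [':'] := by decide
  have hi : PySem.Str.isIn ":" line = ((splitFirstColon line.toList).isSome) := by
    rw [PySem.Str.isIn_eq, hcolon]
    exact isIn_colon line.toList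
  unfold fA
  cases hs : splitFirstColon line.toList with
  | none =>
    rw [hi, hs]
    simp [renderL, hs]
  | some p =>
    obtain ⟨a, b⟩ := p
    have hsplit : PySem.Str.splitMax? line ":" 1 = some [String.ofList a, String.ofList b] := by
      have hbr := PySem.Str.splitMax?_map line ":" 1
      rw [hcolon] at hbr
      have hcs : PySem.Chars.splitMax? line.toList [':'] 1 = some [a, b] := by
        rw [splitMax_colon, hs]
      rw [hcs] at hbr
      cases hm : PySem.Str.splitMax? line ":" 1 with
      | none => rw [hm] at hbr; simp at hbr
      | some parts =>
        rw [hm] at hbr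
        simp only [Option.map_some, Option.some.injEq] at hbr
        cases parts with
        | nil => simp at hbr
        | cons x xs =>
          cases xs with
          | nil => simp at hbr
          | cons y ys =>
            cases ys with
            | cons z zs => simp at hbr
            | nil =>
              simp only [List.map_cons, List.map_nil, List.cons.injEq, and_true] at hbr
              simp only [Option.some.injEq, List.cons.injEq, and_true]
              refine ⟨String.ext ?_, String.ext ?_⟩
              · simp [hbr.1]
              · simp [hbr.2]
    rw [hi, hs, hsplit]
    simp only [Option.isSome_some, if_true]
    unfold renderL
    rw [hs]
    apply String.ext
    simp [pyLjust, PySem.Str.toList_lstrip, PySem.Str.len_eq]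

-- ===== VERDICT (by name: the statement is the Claim_ definition above) =====
theorem align_colons_py_spec : Claim_equal_align_colons_py := by
  intro lines _
  unfold Spec_align_colons_py align_colons_py align_colons_py_alt
  have hB := foldInv lines []
  simp only [List.map_nil, List.nil_append] at hB
  rw [show (fixOf [] 0) = ([] : List (Int × Int)) from rfl] at hB
  rw [show (([] : List String).foldl wUpd 0) = (0 : Int) from rfl] at hB
  rw [hB]
  simp only []
  have hw : lines.foldl (fun m line =>
      if PySem.Str.isIn ":" line then max m (PySem.Str.find line ":") else m) 0
      = lines.foldl wUpd 0 :=
    PySem.List.foldl_congr_mem lines _ _ 0 (fun m line _ => widthA m line)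
  rw [hw]
  set W := lines.foldl wUpd 0 with hW
  have hstep : lines.foldl (fun acc line =>
      if PySem.Str.isIn ":" line then
        match PySem.Str.splitMax? line ":" 1 with
        | some (label :: value :: _) =>
            acc ++ [pyLjust label W ++ ": " ++ PySem.Str.lstrip value]
        | _ => acc ++ [line]
      else acc ++ [line]) []
      = lines.foldl (fun acc line => acc ++ [fA W line]) [] := by
    apply PySem.List.foldl_congr_mem
    intro acc line _
    unfold fA
    by_cases h : PySem.Str.isIn ":" line
    · simp only [h, if_true]
      cases hm : PySem.Str.splitMax? line ":" 1 with
      | none => rfl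
      | some parts =>
        cases parts with
        | nil => rfl
        | cons x xs =>
          cases xs with
          | nil => rfl
          | cons y ys => rfl
    · rw [if_neg h, if_neg h]
  rw [hstep, foldl_append_map', List.nil_append]
  apply List.map_congr_left
  intro line _
  exact renderLine W line
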